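-- pv_equiv track=rewrite | github.com/zazaho/SimImg | simimg/utils/handyfunctions.py | sortMd5sByFilename
-- ===== SOURCE A (Python) =====
-- def sortMd5sByFilename(md5s, FilenameMd5Dict):
--     #get md5s sorted by filename:
--     # only one time
--     result = []
--     for f in sorted(FilenameMd5Dict):
--         md5 = FilenameMd5Dict[f]
--         if md5 in result:
--             continue
--         if not md5 in md5s:
--             continue
--         result.append(md5)
--     return result
-- ===== SOURCE B (Python) =====
-- def sortMd5sByFilename(md5s, FilenameMd5Dict):
--     # reverse index: for each wanted md5 keep its lexicographically smallest filename,
--     # then sort those (md5, filename) pairs by filename and emit the md5s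
--     wanted = set(md5s)
--     best = {}
--     for f, md5 in FilenameMd5Dict.items():
--         if md5 in wanted:
--             if md5 not in best or f < best[md5]:
--                 best[md5] = f
--     return [md5 for md5, f in sorted(best.items(), key=lambda p: p[1])]
-- ===== Notes on version B (the rewrite author's own statement) =====
-- stated objective: faster
-- what changed: Instead of sorting all filenames and scanning them with linear 'md5 in result' / 'md5 in md5s' list scans, B makes one pass over the raw items building a reverse index md5 -> smallest filename (with md5s hoisted into a set), then sorts only the surviving (md5, filename) pairs by filename.
import Mathlib
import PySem

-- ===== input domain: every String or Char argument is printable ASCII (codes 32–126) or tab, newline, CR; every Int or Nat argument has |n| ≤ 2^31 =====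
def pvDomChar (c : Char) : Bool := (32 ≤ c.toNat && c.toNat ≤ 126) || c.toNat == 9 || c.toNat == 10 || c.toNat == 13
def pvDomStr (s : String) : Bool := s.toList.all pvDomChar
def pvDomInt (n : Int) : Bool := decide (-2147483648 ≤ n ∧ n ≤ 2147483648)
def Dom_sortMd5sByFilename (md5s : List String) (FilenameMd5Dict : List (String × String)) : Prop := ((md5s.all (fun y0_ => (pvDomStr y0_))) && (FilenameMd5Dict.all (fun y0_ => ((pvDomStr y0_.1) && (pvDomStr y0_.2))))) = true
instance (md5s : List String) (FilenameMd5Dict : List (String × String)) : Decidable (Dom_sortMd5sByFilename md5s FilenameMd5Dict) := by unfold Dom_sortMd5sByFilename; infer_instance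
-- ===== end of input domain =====

-- B replaces A's sorted-filename scan with a dedup accumulator by a one-pass reverse index
-- (md5 -> smallest filename, wanted md5s as a set), sorted by filename at the end (objective: faster).

-- ===== PORT A =====
-- 'FilenameMd5Dict[f]' is ported as getD with "" — exact, since f ranges over the dict's keys.
def sortMd5sByFilename (md5s : List String) (FilenameMd5Dict : List (String × String)) : List String :=
  let d := PySem.Dict.ofList FilenameMd5Dict
  (PySem.List.sorted d.keys (fun x => x) false).foldl
    (fun result f =>
      let md5 := d.getD f ""
      if result.contains md5 then result
      else if !(md5s.contains md5) then result
      else result ++ [md5]) []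

-- ===== PORT B =====
-- 'best[md5]' is read as getD with "" only when 'md5 in best' (short-circuit) — exact.
def sortMd5sByFilename_alt (md5s : List String) (FilenameMd5Dict : List (String × String)) : List String :=
  let wanted := PySem.Set.ofList md5s
  let d := PySem.Dict.ofList FilenameMd5Dict
  let best := d.items.foldl
    (fun b p =>
      if wanted.contains p.2 then
        if !b.contains p.2 || p.1 < b.getD p.2 "" then b.insert p.2 p.1 else b
      else b) PySem.Dict.empty
  (PySem.List.sorted best.items (fun p => p.2) false).map (fun p => p.1)

-- ===== PRECONDITION & SPEC =====
def Spec_sortMd5sByFilename (md5s : List String) (FilenameMd5Dict : List (String × String)) (out : List String) : Prop := out = sortMd5sByFilename_alt md5s FilenameMd5Dict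
instance (md5s : List String) (FilenameMd5Dict : List (String × String)) (out : List String) : Decidable (Spec_sortMd5sByFilename md5s FilenameMd5Dict out) := by unfold Spec_sortMd5sByFilename; infer_instance

-- ===== CLAIM (what is proved, stated in full; the proofs are below) =====
def Claim_equal_sortMd5sByFilename : Prop := ∀ (md5s : List String) (FilenameMd5Dict : List (String × String)), Dom_sortMd5sByFilename md5s FilenameMd5Dict → Spec_sortMd5sByFilename md5s FilenameMd5Dict (sortMd5sByFilename md5s FilenameMd5Dict)

-- ===== LEMMAS AND PROOFS =====

-- scan mirroring A's loop body
def pvScan (md5s : List String) (g : String → String) (seen : List String) : List String → List (String × String)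
  | [] => []
  | f :: rest =>
      if seen.contains (g f) then pvScan md5s g seen rest
      else if !(md5s.contains (g f)) then pvScan md5s g seen rest
      else (g f, f) :: pvScan md5s g (seen ++ [g f]) rest

def pvOpMin (o : Option String) (f : String) : Option String :=
  some (match o with | none => f | some x => min x f)

-- Lemma 1: A's foldl = seen ++ scan
theorem pvFoldA_eq (md5s : List String) (g : String → String) :
    ∀ (S : List String) (seen : List String),
      S.foldl (fun result f =>
        let md5 := g f
        if result.contains md5 then result
        else if !(md5s.contains md5) then result
        else result ++ [md5]) seen
      = seen ++ (pvScan md5s g seen S).map (·.1) := by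
  intro S
  induction S with
  | nil => intro seen; simp [pvScan]
  | cons f rest ih =>
    intro seen
    simp only [List.foldl_cons]
    by_cases h1 : g f ∈ seen
    · simpa [pvScan, h1] using ih seen
    · by_cases h2 : g f ∈ md5s
      · simpa [pvScan, h1, h2] using ih (seen ++ [g f])
      · simpa [pvScan, h1, h2] using ih seen

-- Lemma 2: snds of scan form a sublist of S
theorem pvScan_snd_sublist (md5s : List String) (g : String → String) :
    ∀ (S : List String) (seen : List String),
      ((pvScan md5s g seen S).map (·.2)).Sublist S := by
  intro S
  induction S with
  | nil => intro seen; simp [pvScan]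
  | cons f rest ih =>
    intro seen
    simp only [pvScan]
    by_cases h1 : seen.contains (g f)
    · simp only [h1, if_true]; exact (ih seen).cons f
    · by_cases h2 : md5s.contains (g f)
      · simp only [h1, h2, Bool.not_true]
        exact (ih (seen ++ [g f])).cons₂ f
      · simp only [h1, h2, Bool.not_false, if_true]
        exact (ih seen).cons f

-- Lemma 3: membership characterization of scan over a strictly sorted key list
theorem pvScan_mem (md5s : List String) (g : String → String) :
    ∀ (S : List String), S.Pairwise (· < ·) → ∀ (seen : List String) (m f : String),
      ((m, f) ∈ pvScan md5s g seen S ↔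
        m ∉ seen ∧ m ∈ md5s ∧ f ∈ S ∧ g f = m ∧ ∀ f' ∈ S, g f' = m → f ≤ f') := by
  intro S
  induction S with
  | nil => intro _ seen m f; simp [pvScan]
  | cons f0 rest ih =>
    intro hp seen m f
    have hlt : ∀ x ∈ rest, f0 < x := (List.pairwise_cons.mp hp).1
    have hrest := ih (List.pairwise_cons.mp hp).2
    by_cases c1 : g f0 ∈ seen
    · rw [show pvScan md5s g seen (f0 :: rest) = pvScan md5s g seen rest by simp [pvScan, c1],
        hrest seen m f]
      constructor
      · rintro ⟨hm, hmd, hf, hg, hmin⟩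
        have hne : m ≠ g f0 := fun h => hm (h ▸ c1)
        refine ⟨hm, hmd, List.mem_cons_of_mem _ hf, hg, ?_⟩
        intro f' hf' hg'
        rcases List.mem_cons.mp hf' with rfl | hf'
        · exact absurd hg' (fun h => hne h.symm)
        · exact hmin f' hf' hg'
      · rintro ⟨hm, hmd, hf, hg, hmin⟩
        have hne : m ≠ g f0 := fun h => hm (h ▸ c1)
        have hf' : f ∈ rest := by
          rcases List.mem_cons.mp hf with rfl | h
          · exact absurd hg.symm hne
          · exact h
        exact ⟨hm, hmd, hf', hg, fun x hx hgx => hmin x (List.mem_cons_of_mem _ hx) hgx⟩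
    · by_cases c2 : g f0 ∈ md5s
      · rw [show pvScan md5s g seen (f0 :: rest) = (g f0, f0) :: pvScan md5s g (seen ++ [g f0]) rest by
          simp [pvScan, c1, c2], List.mem_cons, hrest (seen ++ [g f0]) m f]
        constructor
        · rintro (hhead | ⟨hm, hmd, hf, hg, hmin⟩)
          · have hm0 : m = g f0 := (Prod.mk.injEq _ _ _ _ ▸ hhead).1
            have hff : f = f0 := (Prod.mk.injEq _ _ _ _ ▸ hhead).2
            subst hm0; subst hff
            refine ⟨c1, c2, List.mem_cons_self, rfl, ?_⟩
            intro f' hf' _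
            rcases List.mem_cons.mp hf' with rfl | hf'
            · exact le_refl _
            · exact le_of_lt (hlt f' hf')
          · have hm' : m ∉ seen ∧ m ≠ g f0 := by
              constructor
              · intro h; exact hm (by simp [h])
              · intro h; exact hm (by simp [h])
            refine ⟨hm'.1, hmd, List.mem_cons_of_mem _ hf, hg, ?_⟩
            intro f' hf' hg'
            rcases List.mem_cons.mp hf' with rfl | hf'
            · exact absurd hg' (fun h => hm'.2 h.symm)
            · exact hmin f' hf' hg'
        · rintro ⟨hm, hmd, hf, hg, hmin⟩
          by_cases hmeq : m = g f0
          · left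
            have hff : f = f0 := by
              rcases List.mem_cons.mp hf with rfl | h
              · rfl
              · exact absurd (hmin f0 List.mem_cons_self hmeq.symm) (not_le.mpr (hlt f h))
            rw [hmeq, hff]
          · right
            have hf' : f ∈ rest := by
              rcases List.mem_cons.mp hf with rfl | h
              · exact absurd hg (fun h => hmeq h.symm)
              · exact h
            refine ⟨by simp [hm, hmeq], hmd, hf', hg,
              fun x hx hgx => hmin x (List.mem_cons_of_mem _ hx) hgx⟩
      · rw [show pvScan md5s g seen (f0 :: rest) = pvScan md5s g seen rest by simp [pvScan, c1, c2],
          hrest seen m f]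
        constructor
        · rintro ⟨hm, hmd, hf, hg, hmin⟩
          have hne : m ≠ g f0 := fun h => c2 (h ▸ hmd)
          refine ⟨hm, hmd, List.mem_cons_of_mem _ hf, hg, ?_⟩
          intro f' hf' hg'
          rcases List.mem_cons.mp hf' with rfl | hf'
          · exact absurd hg' (fun h => hne h.symm)
          · exact hmin f' hf' hg'
        · rintro ⟨hm, hmd, hf, hg, hmin⟩
          have hne : m ≠ g f0 := fun h => c2 (h ▸ hmd)
          have hf' : f ∈ rest := by
            rcases List.mem_cons.mp hf with rfl | h
            · exact absurd hg.symm hne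
            · exact h
          exact ⟨hm, hmd, hf', hg, fun x hx hgx => hmin x (List.mem_cons_of_mem _ hx) hgx⟩

-- Lemma 4: lookup in B's fold result
theorem pvBest_get? (W : String → Bool) :
    ∀ (l : List (String × String)) (b : PySem.Dict String String) (m : String),
      ((l.foldl (fun b p =>
          if W p.2 then
            if !b.contains p.2 || p.1 < b.getD p.2 "" then b.insert p.2 p.1 else b
          else b) b).get? m)
      = if W m then
          ((l.filterMap (fun p => if p.2 = m then some p.1 else none)).foldl pvOpMin (b.get? m))
        else b.get? m := by
  intro l
  induction l with
  | nil => intro b m; simp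
  | cons p rest ih =>
    intro b m
    simp only [List.foldl_cons, List.filterMap_cons]
    by_cases c2 : p.2 = m
    · by_cases cm : W m = true
      · have hc : W p.2 = true := by rw [c2]; exact cm
        rw [ih, if_pos cm, if_pos cm, hc]
        simp only [c2, List.foldl_cons, if_true]
        congr 1
        -- step lookup at m equals pvOpMin (b.get? m) p.1
        rcases hb : b.get? m with _ | x
        · have : b.contains m = false := by
            rw [PySem.Dict.contains_eq_isSome_get?, hb]; rfl
          rw [c2] at *
          simp [this, PySem.Dict.get?_insert_self, pvOpMin]
        · have hcon : b.contains m = true := by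
            rw [PySem.Dict.contains_eq_isSome_get?, hb]; rfl
          have hgd : b.getD m "" = x := by
            rw [PySem.Dict.getD_eq_get?_getD, hb]; rfl
          rw [c2] at *
          by_cases hx : p.1 < x
          · simp [hcon, hgd, hx, PySem.Dict.get?_insert_self, pvOpMin,
              min_eq_right (le_of_lt hx)]
          · simp [hcon, hgd, hx, pvOpMin, hb, min_eq_left (not_lt.mp hx)]
      · have hc : W p.2 = false := by rw [c2]; exact Bool.not_eq_true _ ▸ eq_false_of_ne_true cm
        rw [hc, if_neg (by simp), ih, if_neg cm, if_neg cm]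
    · -- key p.2 ≠ m: the step never changes the lookup at m
      have hstep : ((if W p.2 then
            if !b.contains p.2 || p.1 < b.getD p.2 "" then b.insert p.2 p.1 else b
          else b) : PySem.Dict String String).get? m = b.get? m := by
        split_ifs with h1 h2
        · exact PySem.Dict.get?_insert_of_ne b p.1 (fun h => c2 h.symm)
        · rfl
        · rfl
      rw [ih, hstep, if_neg c2]

-- Lemma 5a: pvOpMin fold from some
theorem pvOpMin_foldl_some : ∀ (fl : List String) (a : String),
    fl.foldl pvOpMin (some a) = some (fl.foldl min a) := by
  intro fl
  induction fl with
  | nil => intro a; rfl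
  | cons x rest ih => intro a; simp [pvOpMin, ih]

-- Lemma 5: fold-min characterization
theorem pvOpMin_foldl_none (fl : List String) (f : String) :
    fl.foldl pvOpMin none = some f ↔ f ∈ fl ∧ ∀ f' ∈ fl, f ≤ f' := by
  cases fl with
  | nil => simp
  | cons f0 rest =>
    have h1 : (f0 :: rest).foldl pvOpMin none = some (rest.foldl min f0) := by
      simp only [List.foldl_cons]
      exact pvOpMin_foldl_some rest f0
    rw [h1]
    constructor
    · intro h
      have hf : f = rest.foldl min f0 := by simpa using h.symm
      subst hf
      rcases PySem.List.foldl_min_mem rest f0 with h | h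
      · exact ⟨by simp [h], by
          intro f' hf'
          rcases List.mem_cons.mp hf' with rfl | hm
          · exact (PySem.List.foldl_min_le rest f').1
          · exact (PySem.List.foldl_min_le rest f0).2 f' hm⟩
      · exact ⟨List.mem_cons_of_mem _ h, by
          intro f' hf'
          rcases List.mem_cons.mp hf' with rfl | hm
          · exact (PySem.List.foldl_min_le rest f').1
          · exact (PySem.List.foldl_min_le rest f0).2 f' hm⟩
    · rintro ⟨hf, hmin⟩
      congr 1
      have h2 : rest.foldl min f0 ≤ f := by
        rcases List.mem_cons.mp hf with rfl | hm
        · exact (PySem.List.foldl_min_le rest f).1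
        · exact (PySem.List.foldl_min_le rest f0).2 f hm
      have h3 : f ≤ rest.foldl min f0 := by
        rcases PySem.List.foldl_min_mem rest f0 with h | h
        · rw [h]; exact hmin f0 List.mem_cons_self
        · exact hmin _ (List.mem_cons_of_mem _ h)
      exact le_antisymm h2 h3

-- Lemma 6: B's fold keeps keys nodup
theorem pvBest_nodup (W : String → Bool) :
    ∀ (l : List (String × String)) (b : PySem.Dict String String), b.keys.Nodup →
      ((l.foldl (fun b p =>
          if W p.2 then
            if !b.contains p.2 || p.1 < b.getD p.2 "" then b.insert p.2 p.1 else b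
          else b) b).keys.Nodup) := by
  intro l
  induction l with
  | nil => intro b hb; exact hb
  | cons p rest ih =>
    intro b hb
    simp only [List.foldl_cons]
    apply ih
    split_ifs
    · exact PySem.Dict.nodup_keys_insert b p.2 p.1 hb
    · exact hb
    · exact hb

theorem pvMain (md5s : List String) (d : PySem.Dict String String) (hnd : d.keys.Nodup) :
    (PySem.List.sorted d.keys (fun x => x) false).foldl
      (fun result f =>
        let md5 := d.getD f ""
        if result.contains md5 then result
        else if !(md5s.contains md5) then result
        else result ++ [md5]) []
    = (PySem.List.sorted
        (d.items.foldl (fun b p =>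
          if (PySem.Set.ofList md5s).contains p.2 then
            if !b.contains p.2 || p.1 < b.getD p.2 "" then b.insert p.2 p.1 else b
          else b) PySem.Dict.empty).items (fun p => p.2) false).map (fun p => p.1) := by
  set S := PySem.List.sorted d.keys (fun x => x) false with hS
  set best := d.items.foldl
    (fun b p =>
      if (PySem.Set.ofList md5s).contains p.2 then
        if !b.contains p.2 || p.1 < b.getD p.2 "" then b.insert p.2 p.1 else b
      else b) PySem.Dict.empty with hbest
  have hperm : S.Perm d.keys := PySem.List.sorted_perm d.keys (fun x => x) false
  have hSnd : S.Nodup := hperm.nodup_iff.mpr hnd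
  have hle : S.Pairwise (fun a b => a ≤ b) := PySem.List.sorted_pairwise d.keys (fun x => x)
  have hSlt : S.Pairwise (· < ·) := (hle.and hSnd).imp (fun h => lt_of_le_of_ne h.1 h.2)
  have hbnd : best.keys.Nodup := by
    rw [hbest]
    exact pvBest_nodup ((PySem.Set.ofList md5s).contains) d.items PySem.Dict.empty (by simp)
  have hkeysmap : best.keys = best.items.map (fun p => p.1) := rfl
  have hbitems : best.items.Nodup := List.Nodup.of_map _ (hkeysmap ▸ hbnd)
  have hget : ∀ m, best.get? m = if m ∈ md5s then
      ((d.items.filterMap (fun p => if p.2 = m then some p.1 else none)).foldl pvOpMin none)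
    else none := by
    intro m
    rw [hbest, pvBest_get? ((PySem.Set.ofList md5s).contains) d.items PySem.Dict.empty m]
    have hW : (PySem.Set.ofList md5s).contains m = decide (m ∈ md5s) := by
      by_cases h : m ∈ md5s
      · simp [h, PySem.Set.mem_ofList]
      · simp [h, PySem.Set.mem_ofList]
    rw [hW]
    simp
  have hflm : ∀ m x, (x ∈ d.items.filterMap (fun p => if p.2 = m then some p.1 else none)) ↔
      (x ∈ d.keys ∧ d.getD x "" = m) := by
    intro m x
    rw [List.mem_filterMap]
    constructor
    · rintro ⟨p, hp, hpx⟩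
      by_cases h : p.2 = m
      · rw [if_pos h] at hpx
        obtain rfl : p.1 = x := Option.some.inj hpx
        have hp' : (p.1, p.2) ∈ d.items := by simpa using hp
        refine ⟨PySem.Dict.mem_keys_of_mem_items d hp', ?_⟩
        have h2 : d.getD p.1 "" = p.2 := PySem.Dict.getD_of_mem_items d hp' hnd ""
        rw [h2, h]
      · rw [if_neg h] at hpx; exact absurd hpx (by simp)
    · rintro ⟨hx, hgx⟩
      refine ⟨(x, m), ?_, by simp⟩
      rw [PySem.Dict.items_eq_map_keys d hnd "", List.mem_map]
      exact ⟨x, hx, by rw [← hgx]⟩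
  have hsorted : PySem.List.sorted best.items (fun p => p.2) false
      = pvScan md5s (fun f => d.getD f "") [] S := by
    apply PySem.List.sorted_eq_of_perm_of_pairwise_lt
    · apply List.perm_of_nodup_nodup_toFinset_eq
      · have hsub := pvScan_snd_sublist md5s (fun f => d.getD f "") S []
        exact List.Nodup.of_map _ (hsub.nodup hSnd)
      · exact hbitems
      · ext p
        obtain ⟨m, f⟩ := p
        simp only [List.mem_toFinset]
        rw [pvScan_mem md5s (fun f => d.getD f "") S hSlt [] m f,
          ← PySem.Dict.get?_eq_some_iff_mem_items best m f hbnd, hget m]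
        by_cases cm : m ∈ md5s
        · rw [if_pos cm, pvOpMin_foldl_none]
          constructor
          · rintro ⟨_, _, hfS, hgf, hmin⟩
            refine ⟨(hflm m f).mpr ⟨hperm.mem_iff.mp hfS, hgf⟩, ?_⟩
            intro f' hf'
            obtain ⟨hf'k, hgf'⟩ := (hflm m f').mp hf'
            exact hmin f' (hperm.mem_iff.mpr hf'k) hgf'
          · rintro ⟨hf, hmin⟩
            obtain ⟨hfk, hgf⟩ := (hflm m f).mp hf
            refine ⟨by simp, cm, hperm.mem_iff.mpr hfk, hgf, ?_⟩
            intro f' hf' hgf'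
            exact hmin f' ((hflm m f').mpr ⟨hperm.mem_iff.mp hf', hgf'⟩)
        · rw [if_neg cm]
          simp [cm]
    · have hsub := pvScan_snd_sublist md5s (fun f => d.getD f "") S []
      exact List.pairwise_map.mp (hSlt.sublist hsub)
  rw [hsorted]
  simpa using pvFoldA_eq md5s (fun f => d.getD f "") S []

-- ===== VERDICT (by name: the statement is the Claim_ definition above) =====
theorem sortMd5sByFilename_spec : Claim_equal_sortMd5sByFilename := by
  intro md5s F _
  unfold Spec_sortMd5sByFilename sortMd5sByFilename sortMd5sByFilename_alt
  exact pvMain md5s (PySem.Dict.ofList F) (PySem.Dict.nodup_keys_ofList F)
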